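-- pv_equiv track=rewrite | github.com/ahmeddiab1234/python_HWs | Recursion/Medium_to_Hard/HW_2.py | get_path_sum
-- ===== SOURCE A (Python) =====
-- def is_grid_valid(r, c, row, col):
--     return 0 <= r < row and 0 <= c < col
--
-- def get_positions(r, c, row, col):
--     directions = [(1, 0), (0, 1), (1, 1)]
--     return [(r + di, c + dj) for di, dj in directions if is_grid_valid(r + di, c + dj, row, col)]
--
-- def get_path_sum(matrix, r=0, c=0):
--     res = matrix[r][c]
--     rows, cols = len(matrix), len(matrix[0])
--     positions = get_positions(r, c, rows, cols)
--
--     if not positions: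
--         return res
--
--     r, c = max(positions, key=lambda pos: matrix[pos[0]][pos[1]])
--     res += get_path_sum(matrix, r, c)
--     return res
-- ===== SOURCE B (Python) =====
-- def get_path_sum(matrix, r=0, c=0):
--     rows, cols = len(matrix), len(matrix[0])
--     res = 0
--     while True:
--         res += matrix[r][c]
--         best = None
--         for dr, dc in ((1, 0), (0, 1), (1, 1)):
--             nr, nc = r + dr, c + dc
--             if 0 <= nr < rows and 0 <= nc < cols and (
--                     best is None or matrix[best[0]][best[1]] < matrix[nr][nc]):
--                 best = (nr, nc)
--         if best is None:
--             return res
--         r, c = best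
-- ===== Notes on version B (the rewrite author's own statement) =====
-- stated objective: alternative
-- what changed: Replaced A's greedy recursion (which builds a candidate list per cell and calls max(key=...)) by an iterative while-loop with a running sum that scans the three neighbours in place, keeping the strictly-best in-range one (same first-wins tie-break).
-- outside the precondition, e.g. on get_path_sum([[1], [2, 5]], 0, 0): A returns 3, B returns 3
import Mathlib
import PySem

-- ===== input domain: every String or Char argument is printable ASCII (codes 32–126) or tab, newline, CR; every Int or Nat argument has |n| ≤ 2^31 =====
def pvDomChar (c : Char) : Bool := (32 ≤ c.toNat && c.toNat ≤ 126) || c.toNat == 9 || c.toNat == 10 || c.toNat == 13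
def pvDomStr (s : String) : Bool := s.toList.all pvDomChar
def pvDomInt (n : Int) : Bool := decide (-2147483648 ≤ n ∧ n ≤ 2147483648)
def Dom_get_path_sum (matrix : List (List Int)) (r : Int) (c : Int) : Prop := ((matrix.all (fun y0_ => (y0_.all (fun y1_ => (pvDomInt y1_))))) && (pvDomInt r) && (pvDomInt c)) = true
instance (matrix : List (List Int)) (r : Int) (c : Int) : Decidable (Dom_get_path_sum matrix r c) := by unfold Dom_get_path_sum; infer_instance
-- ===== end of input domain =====

-- B replaces A's greedy recursion by an iterative loop that scans the three neighbours in
-- place (no candidate list, no max() call, no recursion); same values, same tie-breaking.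


-- matrix[x][y] (both Pythons read cells with exactly this expression; Pre_ keeps every
-- executed read in range, so the default is never the value of a returned read)
def pv_cell (matrix : List (List Int)) (x y : Int) : Int :=
  PySem.List.pyGetD (PySem.List.pyGetD matrix x []) y 0

-- ===== PORT A =====
def is_grid_valid (r c row col : Int) : Bool :=
  decide (0 ≤ r ∧ r < row ∧ 0 ≤ c ∧ c < col)

def get_positions (r c row col : Int) : List (Int × Int) :=
  (([((1:Int),(0:Int)), (0,1), (1,1)]).filter
      (fun d => is_grid_valid (r + d.1) (c + d.2) row col)).map
    (fun d => (r + d.1, c + d.2))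

-- bounds on any candidate position (cited by get_path_sum's decreasing_by)
theorem mem_get_positions (r c row col : Int) (p : Int × Int)
    (hp : p ∈ get_positions r c row col) :
    0 ≤ p.1 ∧ p.1 < row ∧ 0 ≤ p.2 ∧ p.2 < col ∧ r + c + 1 ≤ p.1 + p.2 := by
  simp only [get_positions, List.mem_map, List.mem_filter, is_grid_valid,
    decide_eq_true_eq, List.mem_cons, List.not_mem_nil, or_false] at hp
  obtain ⟨d, ⟨hd, hv⟩, hmv⟩ := hp
  rcases hd with h1 | h1 | h1 <;> subst h1 <;> subst hmv <;> simp at hv ⊢ <;> omega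

def get_path_sum (matrix : List (List Int)) (r : Int) (c : Int) : Int :=
  let res := pv_cell matrix r c
  let rows : Int := matrix.length
  let cols : Int := (PySem.List.pyGetD matrix 0 []).length
  let positions := get_positions r c rows cols
  if positions = [] then res
  else
    match h : PySem.List.max? positions (fun pos => pv_cell matrix pos.1 pos.2) with
    | none => res
    | some p => res + get_path_sum matrix p.1 p.2
termination_by (((matrix.length : Int) + ((PySem.List.pyGetD matrix 0 []).length : Int)) - r - c).toNat
decreasing_by
  have hb := mem_get_positions _ _ _ _ _ (PySem.List.max?_mem h)
  omega

-- ===== PORT B =====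
-- the 'for dr, dc in ((1,0),(0,1),(1,1))' scan keeping the strictly best in-range neighbour
def pv_best (matrix : List (List Int)) (rows cols r c : Int) : Option (Int × Int) :=
  ([((1:Int),(0:Int)), (0,1), (1,1)]).foldl
    (fun best d =>
      let nr := r + d.1
      let nc := c + d.2
      if 0 ≤ nr ∧ nr < rows ∧ 0 ≤ nc ∧ nc < cols then
        match best with
        | none => some (nr, nc)
        | some b => if pv_cell matrix b.1 b.2 < pv_cell matrix nr nc then some (nr, nc) else best
      else best)
    none

-- the 'while True' loop; the fuel argument only makes it total (it is always sufficient)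
def pv_loop (matrix : List (List Int)) (rows cols : Int) : Nat → Int → Int → Int → Int
  | 0, _, _, res => res
  | fuel + 1, r, c, res =>
      let res := res + pv_cell matrix r c
      match pv_best matrix rows cols r c with
      | none => res
      | some p => pv_loop matrix rows cols fuel p.1 p.2 res

def get_path_sum_alt (matrix : List (List Int)) (r : Int) (c : Int) : Int :=
  let rows : Int := matrix.length
  let cols : Int := (PySem.List.pyGetD matrix 0 []).length
  pv_loop matrix rows cols (matrix.length + (PySem.List.pyGetD matrix 0 []).length + 1) r c 0

-- ===== PRECONDITION & SPEC =====
-- Pre_ restricts to nonempty rectangular matrices with a nonempty first row and a start index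
-- in Python's (possibly negative) indexing range: outside it A raises IndexError, except on
-- some ragged matrices whose greedy path happens to avoid the short rows, where both programs
-- return the same value anyway.
def Pre_get_path_sum (matrix : List (List Int)) (r : Int) (c : Int) : Prop :=
  matrix ≠ [] ∧
  (∀ row ∈ matrix, row.length = (matrix.headD []).length) ∧
  0 < (matrix.headD []).length ∧
  -(matrix.length : Int) ≤ r ∧ r < (matrix.length : Int) ∧
  -((matrix.headD []).length : Int) ≤ c ∧ c < ((matrix.headD []).length : Int)
instance (matrix : List (List Int)) (r : Int) (c : Int) : Decidable (Pre_get_path_sum matrix r c) := by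
  unfold Pre_get_path_sum; infer_instance

def pvWitness_get_path_sum : List (List Int) × Int × Int := ([[1, 2], [3, 4]], 0, 0)

def Spec_get_path_sum (matrix : List (List Int)) (r : Int) (c : Int) (out : Int) : Prop := out = get_path_sum_alt matrix r c
instance (matrix : List (List Int)) (r : Int) (c : Int) (out : Int) : Decidable (Spec_get_path_sum matrix r c out) := by unfold Spec_get_path_sum; infer_instance

-- ===== CLAIM (what is proved, stated in full; the proofs are below) =====
def Claim_equal_get_path_sum : Prop := ∀ (matrix : List (List Int)) (r : Int) (c : Int), Dom_get_path_sum matrix r c → Pre_get_path_sum matrix r c → Spec_get_path_sum matrix r c (get_path_sum matrix r c)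

-- ===== LEMMAS AND PROOFS =====

-- B's neighbour scan is A's max?(get_positions …): same candidate order, same strict test
theorem pv_best_eq_max? (matrix : List (List Int)) (rows cols r c : Int) :
    pv_best matrix rows cols r c
      = PySem.List.max? (get_positions r c rows cols)
          (fun pos => pv_cell matrix pos.1 pos.2) := by
  unfold pv_best PySem.List.max? get_positions
  generalize ([((1:Int),(0:Int)), (0,1), (1,1)] : List (Int × Int)) = dirs
  generalize (none : Option (Int × Int)) = acc
  induction dirs generalizing acc with
  | nil => rfl
  | cons d rest ih =>
      by_cases hv : 0 ≤ r + d.1 ∧ r + d.1 < rows ∧ 0 ≤ c + d.2 ∧ c + d.2 < cols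
      · rcases acc with _ | b <;> simp [is_grid_valid, hv, ih]
      · simp [is_grid_valid, hv, ih]

theorem pv_best_some (matrix : List (List Int)) (rows cols r c : Int) (p : Int × Int)
    (h : pv_best matrix rows cols r c = some p) :
    0 ≤ p.1 ∧ p.1 < rows ∧ 0 ≤ p.2 ∧ p.2 < cols ∧ r + c + 1 ≤ p.1 + p.2 := by
  rw [pv_best_eq_max?] at h
  exact mem_get_positions _ _ _ _ _ (PySem.List.max?_mem h)

-- unfolding equation for A at one step, phrased through pv_best
theorem get_path_sum_step (matrix : List (List Int)) (r c : Int) :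
    get_path_sum matrix r c
      = pv_cell matrix r c +
        (match pv_best matrix (matrix.length : Int)
            ((PySem.List.pyGetD matrix 0 []).length : Int) r c with
          | none => 0
          | some p => get_path_sum matrix p.1 p.2) := by
  rw [get_path_sum, pv_best_eq_max?]
  by_cases hpos : get_positions r c (matrix.length : Int)
      ((PySem.List.pyGetD matrix 0 []).length : Int) = []
  · simp [hpos, PySem.List.max?]
  · simp only [hpos, if_false]
    rcases h : PySem.List.max? (get_positions r c (matrix.length : Int)
        ((PySem.List.pyGetD matrix 0 []).length : Int))
        (fun pos => pv_cell matrix pos.1 pos.2) with _ | p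
    · simp
    · ring

-- the loop with enough fuel computes res + A, from any in-range current cell
theorem pv_loop_eq (matrix : List (List Int)) :
    ∀ (fuel : Nat) (r c res : Int), 0 ≤ r → r < (matrix.length : Int) → 0 ≤ c →
      c < ((PySem.List.pyGetD matrix 0 []).length : Int) →
      (matrix.length : Int) + ((PySem.List.pyGetD matrix 0 []).length : Int) - r - c ≤ (fuel : Int) →
      pv_loop matrix (matrix.length : Int) ((PySem.List.pyGetD matrix 0 []).length : Int)
          fuel r c res
        = res + get_path_sum matrix r c := by
  intro fuel
  induction fuel with
  | zero => intro r c res h1 h2 h3 h4 h5; omega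
  | succ n ih =>
      intro r c res h1 h2 h3 h4 h5
      rw [get_path_sum_step]
      rcases h : pv_best matrix (matrix.length : Int)
          ((PySem.List.pyGetD matrix 0 []).length : Int) r c with _ | p
      · simp [pv_loop, h]
      · have hb := pv_best_some _ _ _ _ _ _ h
        simp only [pv_loop, h]
        rw [ih p.1 p.2 _ hb.1 hb.2.1 hb.2.2.1 hb.2.2.2.1 (by omega)]
        ring

-- ===== VERDICT (by name: the statement is the Claim_ definition above) =====
theorem get_path_sum_spec : Claim_equal_get_path_sum := by
  intro matrix r c _ hpre
  unfold Spec_get_path_sum get_path_sum_alt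
  rw [get_path_sum_step]
  rcases h : pv_best matrix (matrix.length : Int)
      ((PySem.List.pyGetD matrix 0 []).length : Int) r c with _ | p
  · simp [pv_loop, h]
  · have hb := pv_best_some _ _ _ _ _ _ h
    simp only [pv_loop, h]
    rw [pv_loop_eq matrix _ p.1 p.2 _ hb.1 hb.2.1 hb.2.2.1 hb.2.2.2.1 (by push_cast; omega)]
    ring
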